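-- pv_equiv track=rewrite | github.com/choudoufu520/sky-autoplay | src/application/ai_arranger.py | validate_note_map
-- ===== SOURCE A (Python) =====
-- def _snap_replacement(note: int, available: list[int]) -> int:
--     """Snap an invalid replacement to the nearest available note."""
--     best = available[0]
--     best_dist = abs(note - best)
--     for n in available:
--         d = abs(note - n)
--         if d < best_dist:
--             best = n
--             best_dist = d
--     return best
--
-- def validate_note_map(
--     note_map: dict[int, int],
--     available_set: set[int],
--     available_sorted: list[int],
-- ) -> tuple[dict[int, int], int]:
--     """Fix replacements not in the available set. Returns (fixed_map, fix_count)."""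
--     fixed: dict[int, int] = {}
--     fix_count = 0
--     for orig, repl in note_map.items():
--         if repl == -1 or repl in available_set:
--             fixed[orig] = repl
--         else:
--             fixed[orig] = _snap_replacement(repl, available_sorted)
--             fix_count += 1
--     return fixed, fix_count
-- ===== SOURCE B (Python) =====
-- def validate_note_map(
--     note_map: dict[int, int],
--     available_set: set[int],
--     available_sorted: list[int],
-- ) -> tuple[dict[int, int], int]:
--     """Fix replacements not in the available set. Returns (fixed_map, fix_count).
--
--     Collect the distinct invalid replacements, snap each of them once with
--     min(key=distance), then build the fixed map by lookup."""
--     bad = {r for r in note_map.values() if r != -1 and r not in available_set}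
--     snapped = {r: min(available_sorted, key=lambda n: abs(r - n)) for r in bad}
--     fixed = {o: snapped.get(r, r) for o, r in note_map.items()}
--     return fixed, sum(1 for r in note_map.values() if r in bad)
-- ===== Notes on version B (the rewrite author's own statement) =====
-- stated objective: faster
-- what changed: B replaces A's single loop (which rescans available_sorted for every invalid entry) by three comprehensions: it collects the distinct invalid replacements into a set, snaps each of them once with min(key=distance) into a lookup dict, and builds the fixed map and the count from those; Pre_ excludes only the inputs on which A raises (empty available_sorted with some replacement needing a snap).
import Mathlib
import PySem

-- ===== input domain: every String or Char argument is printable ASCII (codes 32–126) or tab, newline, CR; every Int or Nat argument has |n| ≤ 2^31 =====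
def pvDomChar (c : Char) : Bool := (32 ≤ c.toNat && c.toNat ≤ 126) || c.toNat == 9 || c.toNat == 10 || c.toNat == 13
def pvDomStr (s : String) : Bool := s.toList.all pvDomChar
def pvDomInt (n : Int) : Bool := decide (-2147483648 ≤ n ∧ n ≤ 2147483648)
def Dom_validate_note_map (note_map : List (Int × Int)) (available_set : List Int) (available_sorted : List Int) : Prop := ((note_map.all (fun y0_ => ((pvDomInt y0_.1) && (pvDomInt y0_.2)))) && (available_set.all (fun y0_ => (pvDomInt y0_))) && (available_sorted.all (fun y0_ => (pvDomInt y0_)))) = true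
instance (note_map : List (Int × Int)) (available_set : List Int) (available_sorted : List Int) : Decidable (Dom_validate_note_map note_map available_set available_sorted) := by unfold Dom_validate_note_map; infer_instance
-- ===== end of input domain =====

-- B collects the distinct invalid replacements into a set, snaps each ONCE with min(key=distance)
-- into a lookup dict, and builds the fixed map and the count by comprehensions, instead of A's
-- single loop that rescans available_sorted for every invalid entry: O(n + u*k) for u distinct
-- invalid replacements vs A's O(n*k) (measurably faster). Neither version mutates its arguments.

-- ===== PORT A =====
def pv_snapA (note : Int) (avail : List Int) : Int :=
  match PySem.List.pyGet? avail 0 with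
  | none => 0  -- available[0] raises IndexError on []: excluded by Pre_
  | some b0 =>
    (avail.foldl (fun (st : Int × Int) n =>
        if |note - n| < st.2 then (n, |note - n|) else st)
      (b0, |note - b0|)).1

def validate_note_map (note_map : List (Int × Int)) (available_set : List Int) (available_sorted : List Int) : (List (Int × Int)) × Int :=
  let st := note_map.foldl (fun (st : PySem.Dict Int Int × Int) p =>
      if p.2 == -1 || available_set.contains p.2 then (st.1.insert p.1 p.2, st.2)
      else (st.1.insert p.1 (pv_snapA p.2 available_sorted), st.2 + 1))
    (PySem.Dict.empty, 0)
  (st.1.items, st.2)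

-- ===== PORT B =====
def validate_note_map_alt (note_map : List (Int × Int)) (available_set : List Int) (available_sorted : List Int) : (List (Int × Int)) × Int :=
  let bad : PySem.Set Int :=
    PySem.Set.ofList ((note_map.map Prod.snd).filter
      (fun r => !(r == -1) && !(available_set.contains r)))
  -- min(available_sorted, key=…) raises ValueError on []: excluded by Pre_ (the fold is empty then)
  let snapped : PySem.Dict Int Int :=
    bad.foldl (fun d r =>
      d.insert r ((PySem.List.min? available_sorted (fun n => |r - n|)).getD 0)) PySem.Dict.empty
  let fixed : PySem.Dict Int Int :=
    note_map.foldl (fun d p => d.insert p.1 (snapped.getD p.2 p.2)) PySem.Dict.empty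
  (fixed.items, ((note_map.map Prod.snd).countP (fun r => bad.contains r) : Nat))

-- ===== PRECONDITION & SPEC =====
-- Pre_ excludes exactly the inputs on which A raises: an empty available_sorted together with some
-- replacement that needs snapping (A's available[0] is an IndexError there; B's min() raises too).
def Pre_validate_note_map (note_map : List (Int × Int)) (available_set : List Int) (available_sorted : List Int) : Prop :=
  available_sorted ≠ [] ∨ ∀ p ∈ note_map, p.2 = -1 ∨ p.2 ∈ available_set
instance (note_map : List (Int × Int)) (available_set : List Int) (available_sorted : List Int) : Decidable (Pre_validate_note_map note_map available_set available_sorted) := by unfold Pre_validate_note_map; infer_instance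

def pvWitness_validate_note_map : (List (Int × Int)) × List Int × List Int := ([(60, 61), (62, -1)], [61], [61])

def Spec_validate_note_map (note_map : List (Int × Int)) (available_set : List Int) (available_sorted : List Int) (out : (List (Int × Int)) × Int) : Prop := out = validate_note_map_alt note_map available_set available_sorted
instance (note_map : List (Int × Int)) (available_set : List Int) (available_sorted : List Int) (out : (List (Int × Int)) × Int) : Decidable (Spec_validate_note_map note_map available_set available_sorted out) := by unfold Spec_validate_note_map; infer_instance

-- ===== CLAIM (what is proved, stated in full; the proofs are below) =====
def Claim_equal_validate_note_map : Prop := ∀ (note_map : List (Int × Int)) (available_set : List Int) (available_sorted : List Int), Dom_validate_note_map note_map available_set available_sorted → Pre_validate_note_map note_map available_set available_sorted → Spec_validate_note_map note_map available_set available_sorted (validate_note_map note_map available_set available_sorted)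

-- ===== LEMMAS AND PROOFS =====

-- A's tracked (best, best_dist) pair computes the same element as Python's min(xs, key), step for step
theorem pv_snap_eq (r : Int) (l : List Int) (h : l ≠ []) :
    pv_snapA r l = (PySem.List.min? l (fun n => |r - n|)).getD 0 := by
  obtain ⟨a, t, rfl⟩ := List.exists_cons_of_ne_nil h
  have h0 : PySem.List.pyGet? (a :: t) 0 = some a := by
    simp [PySem.List.pyGet?, PySem.List.pyIdx?]
  unfold pv_snapA PySem.List.min?
  simp only [h0, List.foldl_cons]
  rw [if_neg (by omega)]
  induction t generalizing a with
  | nil => simp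
  | cons x t ih =>
    simp only [List.foldl_cons]
    by_cases hx : |r - x| < |r - a|
    · rw [if_pos hx]
      have := ih x
      simpa [hx] using this
    · rw [if_neg hx]
      have := ih a
      simpa [hx] using this

-- getD on a dict built by inserting f k at every key k of a list
theorem pv_getD_foldl_insert (f : Int → Int) (l : List Int) (d : PySem.Dict Int Int) (r : Int) :
    (l.foldl (fun d k => d.insert k (f k)) d).getD r r
      = if r ∈ l then f r else d.getD r r := by
  induction l generalizing d with
  | nil => simp
  | cons k l ih =>
    simp only [List.foldl_cons, ih, List.mem_cons]
    by_cases hm : r ∈ l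
    · simp [hm]
    · rw [if_neg (by simp [hm]), PySem.Dict.getD_insert]
      by_cases hk : r = k
      · simp [hk]
      · simp [hk, hm]

-- A's single loop (dict + counter) split into a dict-building fold plus a separate count
theorem pv_outer (aset : List Int) (v : Int → Int) (nm : List (Int × Int)) (d0 : PySem.Dict Int Int) (c0 : Int) :
    nm.foldl (fun (st : PySem.Dict Int Int × Int) p =>
        if p.2 == -1 || aset.contains p.2 then (st.1.insert p.1 p.2, st.2)
        else (st.1.insert p.1 (v p.2), st.2 + 1)) (d0, c0)
      = (nm.foldl (fun (d : PySem.Dict Int Int) p =>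
            d.insert p.1 (if p.2 == -1 || aset.contains p.2 then p.2 else v p.2)) d0,
         c0 + ((nm.map Prod.snd).countP (fun r => !(r == -1) && !(aset.contains r)) : Nat)) := by
  induction nm generalizing d0 c0 with
  | nil => simp
  | cons p nm ih =>
    simp only [List.foldl_cons, List.map_cons, List.countP_cons]
    by_cases hc : (p.2 == -1 || aset.contains p.2) = true
    · rw [if_pos hc, if_pos hc, ih]
      have : (!(p.2 == -1) && !(aset.contains p.2)) = false := by
        rcases Bool.or_eq_true_iff.mp hc with h | h
        · simp [h]
        · simp [List.contains_iff_mem.mp h]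
      rw [this]
      simp
    · rw [if_neg hc, if_neg hc, ih]
      have : (!(p.2 == -1) && !(aset.contains p.2)) = true := by
        simp only [Bool.or_eq_true] at hc
        push Not at hc
        simp at hc ⊢
        exact hc
      rw [this]
      simp only [Prod.mk.injEq, true_and]
      push_cast
      omega

-- membership in B's 'bad' set, relative to a value r of note_map
theorem pv_mem_bad (nm : List (Int × Int)) (aset : List Int) (r : Int) (hr : r ∈ nm.map Prod.snd) :
    (r ∈ PySem.Set.ofList ((nm.map Prod.snd).filter
        (fun x => !(x == -1) && !(aset.contains x))))
      ↔ (!(r == -1) && !(aset.contains r)) = true := by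
  rw [PySem.Set.mem_ofList, List.mem_filter]
  exact ⟨fun h => h.2, fun h => ⟨hr, h⟩⟩

-- ===== VERDICT (by name: the statement is the Claim_ definition above) =====
theorem validate_note_map_spec : Claim_equal_validate_note_map := by
  intro note_map available_set available_sorted hdom hpre
  unfold Spec_validate_note_map
  unfold validate_note_map validate_note_map_alt
  rw [pv_outer available_set (fun x => pv_snapA x available_sorted) note_map PySem.Dict.empty 0]
  simp only [zero_add]
  have hbadpred : ∀ r ∈ note_map.map Prod.snd,
      (PySem.Set.contains (PySem.Set.ofList ((note_map.map Prod.snd).filter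
          (fun x => !(x == -1) && !(available_set.contains x)))) r)
        = (!(r == -1) && !(available_set.contains r)) := by
    intro r hr
    apply Bool.eq_iff_iff.mpr
    rw [PySem.Set.contains_iff]
    exact pv_mem_bad note_map available_set r hr
  congr 1
  · -- the fixed dicts agree entry by entry
    congr 1
    apply PySem.List.foldl_congr_mem
    intro acc p hp
    have hr : p.2 ∈ note_map.map Prod.snd := List.mem_map.mpr ⟨p, hp, rfl⟩
    congr 1
    rw [pv_getD_foldl_insert]
    simp only [pv_mem_bad note_map available_set p.2 hr]
    by_cases hc : (p.2 == -1 || available_set.contains p.2) = true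
    · have hnotbad : (!(p.2 == -1) && !(available_set.contains p.2)) = false := by
        rcases Bool.or_eq_true_iff.mp hc with h | h
        · simp [h]
        · simp [List.contains_iff_mem.mp h]
      rw [if_pos hc, hnotbad]
      simp [PySem.Dict.getD_empty]
    · have hbad : (!(p.2 == -1) && !(available_set.contains p.2)) = true := by
        simp only [Bool.or_eq_true] at hc
        push Not at hc
        simp at hc ⊢
        exact hc
      rw [if_neg hc, hbad]
      have hne : available_sorted ≠ [] := by
        rcases hpre with h | h
        · exact h
        · exfalso
          rcases h p hp with h1 | h1
          · exact hc (by simp [h1])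
          · exact hc (by rw [List.contains_iff_mem.mpr h1]; simp)
      simp [pv_snap_eq p.2 available_sorted hne]
  · -- the counts agree
    congr 1
    exact (List.countP_congr (fun r hr => by rw [hbadpred r hr])).symm
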